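-- pv_equiv track=rewrite | github.com/Kyun2da/Algorithm | python/programmers/level2/후보키.py | solution
-- ===== SOURCE A (Python) =====
-- from itertools import combinations
--
-- def solution(relation):
--     rowNum = len(relation)
--     colNum = len(relation[0])
--
--     # 모든 가능한 후보들을 뽑는다.
--     candidates = []
--     for i in range(1, colNum + 1):
--         candidates.extend(combinations(range(colNum), i))
--
--     # 유일성 만족 확인
--     final = []
--     for keys in candidates:
--         tmp = [tuple([item[key] for key in keys]) for item in relation]
--         if len(set(tmp)) == rowNum:
--             final.append(keys)
--
--     # 최소성 만족 확인
--     answer = set(final[:])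
--     for i in range(len(final)):
--         for j in range(i + 1, len(final)):
--             if len(final[i]) == len(set(final[i]).intersection(set(final[j]))):
--                 answer.discard(final[j])
--     return len(answer)
-- ===== SOURCE B (Python) =====
-- from itertools import combinations
--
-- def solution(relation):
--     rowNum = len(relation)
--     colNum = len(relation[0])
--
--     def unique(cols):
--         return len({tuple(row[c] for c in cols) for row in relation}) == rowNum
--
--     count = 0
--     for size in range(1, colNum + 1):
--         for cols in combinations(range(colNum), size):
--             if unique(cols) and not any(
--                 unique(sub)
--                 for k in range(1, size)
--                 for sub in combinations(cols, k)
--             ):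
--                 count += 1
--     return count
-- ===== Notes on version B (the rewrite author's own statement) =====
-- stated objective: simpler
-- what changed: A collects every unique column subset into a list and then runs a quadratic pairwise pass discarding supersets from a set; B makes a single smallest-size-first pass over the subsets and counts a unique subset immediately when none of its proper nonempty subsets is unique, with no collected list and no elimination phase.
import Mathlib
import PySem

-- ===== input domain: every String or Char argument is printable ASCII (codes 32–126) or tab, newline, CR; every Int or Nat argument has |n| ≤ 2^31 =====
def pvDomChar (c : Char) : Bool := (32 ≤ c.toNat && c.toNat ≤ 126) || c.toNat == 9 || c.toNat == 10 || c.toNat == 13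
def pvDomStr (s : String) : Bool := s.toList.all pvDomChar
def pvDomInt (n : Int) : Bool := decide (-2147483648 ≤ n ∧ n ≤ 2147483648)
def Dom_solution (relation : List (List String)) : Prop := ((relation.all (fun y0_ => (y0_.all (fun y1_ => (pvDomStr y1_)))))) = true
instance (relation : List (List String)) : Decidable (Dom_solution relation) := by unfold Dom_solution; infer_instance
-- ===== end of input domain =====

-- B replaces A's collect-all-unique-keys-then-pairwise-eliminate-supersets pipeline by a single
-- ordered pass that counts a unique column subset only when none of its proper nonempty
-- subsets is unique (objective: simpler / alternative decomposition, not faster).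

-- itertools.combinations(l, k) in Python's lexicographic order (shared library helper of both ports)
def pyCombs {α : Type} : List α → Nat → List (List α)
  | _, 0 => [[]]
  | [], _+1 => []
  | x :: xs, k+1 => ((pyCombs xs k).map (fun t => x :: t)) ++ pyCombs xs (k+1)

-- ===== PORT A =====
def solution (relation : List (List String)) : Int :=
  let rowNum := relation.length
  -- relation[0]: Pre_ excludes the empty relation, where Python raises IndexError
  let colNum := ((PySem.List.pyGet? relation 0).getD []).length
  let candidates := (PySem.List.pyRange 1 ((colNum : Int) + 1)).foldl
      (fun acc i => acc ++ pyCombs (PySem.List.pyRange 0 (colNum : Int)) i.toNat) []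
  -- item[key]: Pre_ excludes rows shorter than relation[0] (IndexError)
  let final := candidates.foldl (fun acc ks =>
      if (PySem.Set.ofList (relation.map (fun item =>
            ks.map (fun k => (PySem.List.pyGet? item k).getD "")))).length == rowNum
      then acc ++ [ks] else acc) []
  let answer := PySem.Set.ofList final
  let answer := (PySem.List.pyRange 0 (final.length : Int)).foldl (fun ans i =>
      (PySem.List.pyRange (i + 1) (final.length : Int)).foldl (fun ans j =>
        let fi := (PySem.List.pyGet? final i).getD []
        let fj := (PySem.List.pyGet? final j).getD []
        if fi.length == (PySem.Set.inter (PySem.Set.ofList fi) (PySem.Set.ofList fj)).length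
        then PySem.Set.discard ans fj else ans) ans) answer
  (answer.length : Int)

-- ===== PORT B =====
def solution_alt (relation : List (List String)) : Int :=
  let rowNum := relation.length
  let colNum := ((PySem.List.pyGet? relation 0).getD []).length
  let unique := fun (cols : List Int) =>
    (PySem.Set.ofList (relation.map (fun row =>
        cols.map (fun c => (PySem.List.pyGet? row c).getD "")))).length == rowNum
  (PySem.List.pyRange 1 ((colNum : Int) + 1)).foldl (fun count size =>
    (pyCombs (PySem.List.pyRange 0 (colNum : Int)) size.toNat).foldl (fun count cols =>
      if unique cols && !((PySem.List.pyRange 1 size).any (fun k =>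
            (pyCombs cols k.toNat).any unique))
      then count + 1 else count) count) 0

-- ===== PRECONDITION & SPEC =====
-- Pre_ excludes exactly the inputs where Python A raises IndexError: the empty relation
-- (relation[0]) and relations with a row shorter than the first row (item[key]).
def Pre_solution (relation : List (List String)) : Prop :=
  relation ≠ [] ∧ ∀ row ∈ relation, (relation.headD []).length ≤ row.length
instance (relation : List (List String)) : Decidable (Pre_solution relation) := by
  unfold Pre_solution; infer_instance
def pvWitness_solution : List (List String) := [["a", "b"], ["c", "b"]]
def Spec_solution (relation : List (List String)) (out : Int) : Prop := out = solution_alt relation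
instance (relation : List (List String)) (out : Int) : Decidable (Spec_solution relation out) := by
  unfold Spec_solution; infer_instance

-- ===== CLAIM (what is proved, stated in full; the proofs are below) =====
def Claim_equal_solution : Prop := ∀ (relation : List (List String)), Dom_solution relation → Pre_solution relation → Spec_solution relation (solution relation)

-- ===== LEMMAS AND PROOFS =====

theorem mem_pyCombs {α : Type} (l : List α) (k : Nat) (t : List α) :
    t ∈ pyCombs l k ↔ t.Sublist l ∧ t.length = k := by
  induction l generalizing k t with
  | nil =>
    cases k with
    | zero => simp [pyCombs]
    | succ k =>
      simp [pyCombs]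
      rintro rfl
      simp
  | cons x xs ih =>
    cases k with
    | zero =>
      simp only [pyCombs, List.mem_singleton]
      constructor
      · rintro rfl; simp
      · rintro ⟨h, hl⟩; exact List.eq_nil_of_length_eq_zero hl
    | succ k =>
      simp only [pyCombs, List.mem_append, List.mem_map, ih]
      constructor
      · rintro (⟨t', ⟨hs, hl⟩, rfl⟩ | ⟨hs, hl⟩)
        · exact ⟨List.Sublist.cons₂ x hs, by simp [hl]⟩
        · exact ⟨List.Sublist.cons x hs, hl⟩
      · rintro ⟨hs, hl⟩
        cases hs with
        | cons _ hs => exact Or.inr ⟨hs, hl⟩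
        | cons₂ _ hs =>
          rename_i t'
          exact Or.inl ⟨t', ⟨hs, by simpa using hl⟩, rfl⟩

theorem nodup_pyCombs {α : Type} (l : List α) (hl : l.Nodup) (k : Nat) :
    (pyCombs l k).Nodup := by
  induction l generalizing k with
  | nil => cases k <;> simp [pyCombs]
  | cons x xs ih =>
    cases k with
    | zero => simp [pyCombs]
    | succ k =>
      simp only [List.nodup_cons] at hl
      refine List.Nodup.append ?_ (ih hl.2 (k+1)) ?_
      · exact (ih hl.2 k).map (fun a b h => by injection h)
      · intro t ht ht'
        simp only [List.mem_map] at ht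
        obtain ⟨t', ht', rfl⟩ := ht
        have := ((mem_pyCombs _ _ _).1 ht').1
        exact hl.1 (this.subset (by simp))

theorem pyRange_one_natCast (n : Nat) :
    PySem.List.pyRange 1 ((n : Int) + 1) = (List.range n).map (fun (k : Nat) => ((k : Int)) + 1) := by
  induction n with
  | zero => simp [PySem.List.pyRange]
  | succ n ih =>
    have h1 : ((n + 1 : Nat) : Int) + 1 = ((n : Int) + 1) + 1 := by push_cast; ring
    rw [h1, PySem.List.pyRange_one_succ_right (by omega), ih, List.range_succ]
    simp

-- the fold of conditional discards is a filter
theorem foldl_discard {β : Type} (qs : List β) (c : β → Bool) (e : β → List Int)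
    (s : List (List Int)) :
    qs.foldl (fun s q => if c q then PySem.Set.discard s (e q) else s) s
      = s.filter (fun x => !(qs.any (fun q => c q && (e q == x)))) := by
  induction qs generalizing s with
  | nil => simp
  | cons q qs ih =>
    simp only [List.foldl_cons, ih, List.any_cons]
    by_cases hc : c q = true
    · simp only [hc, if_pos, PySem.Set.discard, List.filter_filter]
      apply List.filter_congr
      intro x _
      cases h : (e q == x)
      · simp
        intro _ hx
        exact (ne_of_beq_false h) hx.symm
      · simp
        intro _
        exact (eq_of_beq h).symm
    · simp only [Bool.not_eq_true] at hc
      simp [hc]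


-- the canonical candidate list: all nonempty sorted column subsets, smallest size first
def candList (n : Nat) : List (List Int) :=
  (List.range n).flatMap (fun k => pyCombs (PySem.List.pyRange 0 (n : Int)) (k + 1))

-- "keep": no proper nonempty sub-combination is unique
def qKeep (u : List Int → Bool) (x : List Int) : Bool :=
  !(x.sublists.any (fun t => u t && !(t == x) && !(t == [])))

theorem colRange_pairwise (n : Nat) : (PySem.List.pyRange 0 (n : Int)).Pairwise (· < ·) := by
  rw [PySem.List.pyRange_zero_natCast]
  exact List.pairwise_lt_range.map _ (by intro a b h; exact_mod_cast h)

theorem colRange_length (n : Nat) : (PySem.List.pyRange 0 (n : Int)).length = n := by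
  rw [PySem.List.pyRange_zero_natCast]; simp

theorem mem_candList (n : Nat) (t : List Int) :
    t ∈ candList n ↔ t.Sublist (PySem.List.pyRange 0 (n : Int)) ∧ t ≠ [] := by
  simp only [candList, List.mem_flatMap, List.mem_range, mem_pyCombs]
  constructor
  · rintro ⟨k, hk, hs, hl⟩
    exact ⟨hs, by intro h; simp [h] at hl⟩
  · rintro ⟨hs, hne⟩
    have h1 : 1 ≤ t.length := List.length_pos_of_ne_nil hne
    have h2 : t.length ≤ n := by
      have := hs.length_le; rwa [colRange_length] at this
    exact ⟨t.length - 1, by omega, hs, by omega⟩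

theorem sorted_of_mem_candList {n : Nat} {t : List Int} (h : t ∈ candList n) :
    t.Pairwise (· < ·) :=
  List.Pairwise.sublist ((mem_candList n t).1 h).1 (colRange_pairwise n)


theorem nodup_candList (n : Nat) : (candList n).Nodup := by
  rw [candList, List.nodup_flatMap]
  refine ⟨fun k _ => nodup_pyCombs _ (colRange_pairwise n).nodup _, ?_⟩
  have : ∀ a b : Nat, a < b → Function.onFun List.Disjoint
      (fun k => pyCombs (PySem.List.pyRange 0 (n : Int)) (k + 1)) a b := by
    intro a b hab t hta htb
    have h1 := ((mem_pyCombs _ _ t).1 hta).2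
    have h2 := ((mem_pyCombs _ _ t).1 htb).2
    omega
  exact List.pairwise_lt_range.imp (fun {a b} h => this a b h)

theorem pairwise_len_candList (n : Nat) :
    (candList n).Pairwise (fun a b => a.length ≤ b.length) := by
  rw [candList, List.flatMap_def, List.pairwise_flatten]
  constructor
  · intro l hl
    simp only [List.mem_map] at hl
    obtain ⟨k, _, rfl⟩ := hl
    refine List.pairwise_of_forall_mem_list ?_
    intro a ha b hb
    have := ((mem_pyCombs _ _ a).1 ha).2
    have := ((mem_pyCombs _ _ b).1 hb).2
    omega
  · rw [List.pairwise_map]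
    refine List.pairwise_lt_range.imp ?_
    intro k₁ k₂ hk x hx y hy
    have := ((mem_pyCombs _ _ x).1 hx).2
    have := ((mem_pyCombs _ _ y).1 hy).2
    omega

-- Python's 'len(s) == len(set(s) & set(t))' on sorted lists is the sublist relation
theorem cond_iff (s t : List Int) (hs : s.Pairwise (· < ·)) (ht : t.Pairwise (· < ·)) :
    ((s.length == (PySem.Set.inter (PySem.Set.ofList s) (PySem.Set.ofList t)).length) = true)
      ↔ s.Sublist t := by
  have hsn : s.Nodup := hs.nodup
  have htn : t.Nodup := ht.nodup
  rw [PySem.Set.ofList_eq_self_of_nodup s hsn, PySem.Set.ofList_eq_self_of_nodup t htn]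
  simp only [PySem.Set.inter, beq_iff_eq]
  constructor
  · intro h
    have : ∀ x ∈ s, (PySem.Set.contains t x) = true :=
      List.length_filter_eq_length_iff.1 h.symm
    have hsub : ∀ x ∈ s, x ∈ t := by
      intro x hx
      have := this x hx
      simpa [PySem.Set.contains] using this
    exact List.sublist_of_subperm_of_pairwise
      (List.subperm_of_subset hsn hsub) hs ht
  · intro h
    have : ∀ x ∈ s, (PySem.Set.contains t x) = true := by
      intro x hx
      simpa [PySem.Set.contains] using h.subset hx
    exact (List.length_filter_eq_length_iff.2 this).symm

-- A's candidate-building fold produces candList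
theorem cand_foldl_eq (n : Nat) :
    (PySem.List.pyRange 1 ((n : Int) + 1)).foldl
      (fun acc i => acc ++ pyCombs (PySem.List.pyRange 0 (n : Int)) i.toNat) []
    = candList n := by
  have h : ∀ k : Nat, (((k : Int)) + 1).toNat = k + 1 := fun k => by omega
  rw [PySem.List.foldl_append_eq_flatMap, List.nil_append, pyRange_one_natCast,
    List.flatMap_map, candList]
  apply List.flatMap_congr
  intro k _
  rw [h]

-- the inner 'any' of B tests exactly "some proper nonempty sub-combination is unique"
theorem inner_any_eq (u : List Int → Bool) (k : Nat) (cols : List Int)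
    (hlen : cols.length = k + 1) :
    ((PySem.List.pyRange 1 ((k : Int) + 1)).any (fun kk => (pyCombs cols kk.toNat).any u))
      = !(qKeep u cols) := by
  rw [qKeep, Bool.not_not, pyRange_one_natCast, List.any_map, Bool.eq_iff_iff]
  simp only [List.any_eq_true, List.mem_range, Function.comp_apply, mem_pyCombs,
    List.mem_sublists, Bool.and_eq_true, Bool.not_eq_eq_eq_not, Bool.not_true, beq_eq_false_iff_ne,
    ne_eq]
  constructor
  · rintro ⟨j, hj, t, ⟨hts, htl⟩, hu⟩
    have h1 : (((j : Int)) + 1).toNat = j + 1 := by omega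
    rw [h1] at htl
    refine ⟨t, hts, ⟨hu, ?_⟩, ?_⟩
    · intro h; rw [h] at htl; omega
    · intro h; rw [h] at htl; simp at htl
  · rintro ⟨t, hts, ⟨hu, htc⟩, htn⟩
    have h1 : 1 ≤ t.length := List.length_pos_of_ne_nil htn
    have h2 : t.length < cols.length := by
      rcases Nat.lt_or_ge t.length cols.length with h | h
      · exact h
      · exact absurd (hts.eq_of_length (le_antisymm hts.length_le h)) htc
    refine ⟨t.length - 1, by omega, t, ⟨hts, ?_⟩, hu⟩
    have h3 : ((((t.length - 1 : Nat)) : Int) + 1).toNat = t.length := by omega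
    rw [h3]

-- B's counting fold counts the minimal unique subsets among candList
theorem bside_eq (u : List Int → Bool) (n : Nat) :
    (PySem.List.pyRange 1 ((n : Int) + 1)).foldl (fun count size =>
      (pyCombs (PySem.List.pyRange 0 (n : Int)) size.toNat).foldl (fun count cols =>
        if u cols && !((PySem.List.pyRange 1 size).any (fun k =>
              (pyCombs cols k.toNat).any u))
        then count + 1 else count) count) 0
    = ((candList n).countP (fun cols => u cols && qKeep u cols) : Int) := by
  rw [pyRange_one_natCast, List.foldl_map]
  rw [PySem.List.foldl_congr_mem (List.range n) _ (fun (count : Int) (k : Nat) =>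
        count + (List.countP (fun cols => u cols && qKeep u cols)
          (pyCombs (PySem.List.pyRange 0 (n : Int)) (k + 1)) : Int)) 0 ?_]
  · rw [PySem.List.foldl_add, candList, List.countP_flatMap, Nat.cast_list_sum, zero_add]
    simp [Function.comp_def]
  · intro acc k _
    have h1 : (((k : Int)) + 1).toNat = k + 1 := by omega
    rw [h1]
    rw [PySem.List.foldl_congr_mem (pyCombs (PySem.List.pyRange 0 (n : Int)) (k + 1)) _
      (fun (count : Int) cols => if u cols && qKeep u cols then count + 1 else count) acc ?_]
    · rw [PySem.List.foldl_count_if]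
    · intro c cols hc
      have hlen := ((mem_pyCombs _ _ cols).1 hc).2
      rw [inner_any_eq u k cols hlen, Bool.not_not]

-- A's pipeline counts the same subsets
theorem aside_eq (u : List Int → Bool) (n : Nat) :
    (let candidates := (PySem.List.pyRange 1 ((n : Int) + 1)).foldl
        (fun acc i => acc ++ pyCombs (PySem.List.pyRange 0 (n : Int)) i.toNat) [];
     let final := candidates.foldl (fun acc ks => if u ks then acc ++ [ks] else acc) [];
     let answer := PySem.Set.ofList final;
     let answer := (PySem.List.pyRange 0 (final.length : Int)).foldl (fun ans i =>
        (PySem.List.pyRange (i + 1) (final.length : Int)).foldl (fun ans j =>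
          if ((PySem.List.pyGet? final i).getD []).length ==
              (PySem.Set.inter (PySem.Set.ofList ((PySem.List.pyGet? final i).getD []))
                (PySem.Set.ofList ((PySem.List.pyGet? final j).getD []))).length
          then PySem.Set.discard ans ((PySem.List.pyGet? final j).getD []) else ans) ans) answer;
     ((answer.length : Int)))
    = ((candList n).countP (fun cols => u cols && qKeep u cols) : Int) := by
  simp only [cand_foldl_eq]
  rw [PySem.List.foldl_append_if u (fun ks => ks) (candList n) [], List.nil_append, List.map_id']
  have hFnodup : ((candList n).filter u).Nodup := (nodup_candList n).filter u
  rw [PySem.Set.ofList_eq_self_of_nodup _ hFnodup]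
  -- name the filtered list and its length
  set F : List (List Int) := (candList n).filter u with hF
  set m : Nat := F.length with hm
  -- flatten the two nested index loops into one loop over index pairs
  set P : List (Int × Int) := (PySem.List.pyRange 0 (m : Int)).flatMap
      (fun i => (PySem.List.pyRange (i + 1) (m : Int)).map (fun j => (i, j))) with hP
  have hflat : (PySem.List.pyRange 0 (m : Int)).foldl (fun ans i =>
        (PySem.List.pyRange (i + 1) (m : Int)).foldl (fun ans j =>
          if ((PySem.List.pyGet? F i).getD []).length ==
              (PySem.Set.inter (PySem.Set.ofList ((PySem.List.pyGet? F i).getD []))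
                (PySem.Set.ofList ((PySem.List.pyGet? F j).getD []))).length
          then PySem.Set.discard ans ((PySem.List.pyGet? F j).getD []) else ans) ans) F
      = P.foldl (fun ans p =>
          if ((PySem.List.pyGet? F p.1).getD []).length ==
              (PySem.Set.inter (PySem.Set.ofList ((PySem.List.pyGet? F p.1).getD []))
                (PySem.Set.ofList ((PySem.List.pyGet? F p.2).getD []))).length
          then PySem.Set.discard ans ((PySem.List.pyGet? F p.2).getD []) else ans) F := by
    rw [hP, List.foldl_flatMap]
    simp only [List.foldl_map]
  rw [hflat, foldl_discard P
    (fun p => ((PySem.List.pyGet? F p.1).getD []).length ==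
        (PySem.Set.inter (PySem.Set.ofList ((PySem.List.pyGet? F p.1).getD []))
          (PySem.Set.ofList ((PySem.List.pyGet? F p.2).getD []))).length)
    (fun p => (PySem.List.pyGet? F p.2).getD []) F]
  rw [← List.countP_eq_length_filter]
  -- facts about F
  have hmemF : ∀ y ∈ F, y ∈ candList n ∧ u y = true := by
    intro y hy; exact ⟨(List.mem_filter.1 hy).1, (List.mem_filter.1 hy).2⟩
  have hsortF : ∀ y ∈ F, y.Pairwise (· < ·) := by
    intro y hy; exact sorted_of_mem_candList (hmemF y hy).1
  have hpairF : F.Pairwise (fun a b => a.length ≤ b.length) :=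
    List.Pairwise.sublist (List.filter_sublist (l := candList n) (p := u)) (pairwise_len_candList n)
  -- the surviving elements are exactly those with no unique proper nonempty subset
  have hmain : ∀ x ∈ F,
      ((P.any fun p => (((PySem.List.pyGet? F p.1).getD []).length ==
          (PySem.Set.inter (PySem.Set.ofList ((PySem.List.pyGet? F p.1).getD []))
            (PySem.Set.ofList ((PySem.List.pyGet? F p.2).getD []))).length)
          && ((PySem.List.pyGet? F p.2).getD [] == x)) = true
        ↔ (∃ t, t.Sublist x ∧ t ≠ x ∧ t ≠ [] ∧ u t = true)) := by
    intro x hxF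
    obtain ⟨b, hb, hFb⟩ := List.mem_iff_getElem.1 hxF
    constructor
    · rintro h
      rw [List.any_eq_true] at h
      obtain ⟨p, hpP, hp⟩ := h
      rw [hP, List.mem_flatMap] at hpP
      obtain ⟨i, hi, hpi⟩ := hpP
      rw [List.mem_map] at hpi
      obtain ⟨j, hj, rfl⟩ := hpi
      rw [PySem.List.mem_pyRange_one] at hi hj
      simp only at hp
      have hi0 : (0 : Int) ≤ i := hi.1
      have hj0 : (0 : Int) ≤ j := by omega
      obtain ⟨a, rfl⟩ : ∃ a : Nat, i = (a : Int) := ⟨i.toNat, (Int.toNat_of_nonneg hi0).symm⟩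
      obtain ⟨b', rfl⟩ : ∃ b' : Nat, j = (b' : Int) := ⟨j.toNat, (Int.toNat_of_nonneg hj0).symm⟩
      have ham : a < m := by exact_mod_cast hi.2
      have hbm : b' < m := by exact_mod_cast hj.2
      have hab : a < b' := by
        have := hj.1
        omega
      rw [PySem.List.pyGet?_natCast, PySem.List.pyGet?_natCast] at hp
      rw [List.getElem?_eq_getElem ham, List.getElem?_eq_getElem hbm] at hp
      simp only [Option.getD_some, Bool.and_eq_true, beq_iff_eq] at hp
      have hb'b : b' = b := by
        have := hFnodup.getElem_inj_iff (hi := hbm) (hj := hb)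
        exact this.1 (by rw [hp.2, hFb])
      subst hb'b
      refine ⟨F[a], ?_, ?_, ?_, (hmemF _ (List.getElem_mem ham)).2⟩
      · rw [← hFb]
        exact (cond_iff _ _ (hsortF _ (List.getElem_mem ham))
          (hsortF _ (List.getElem_mem hbm))).1 (beq_iff_eq.2 hp.1)
      · rw [← hFb]
        intro hcon
        exact absurd ((hFnodup.getElem_inj_iff).1 hcon) (by omega)
      · exact ((mem_candList n _).1 (hmemF _ (List.getElem_mem ham)).1).2
    · rintro ⟨t, hts, htx, htn, hut⟩
      have hxc : x ∈ candList n := (hmemF x hxF).1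
      have htc : t ∈ candList n := by
        rw [mem_candList]
        exact ⟨hts.trans ((mem_candList n x).1 hxc).1, htn⟩
      have htF : t ∈ F := List.mem_filter.2 ⟨htc, hut⟩
      obtain ⟨a, ha, hFa⟩ := List.mem_iff_getElem.1 htF
      have htlen : t.length < x.length := by
        rcases Nat.lt_or_ge t.length x.length with h | h
        · exact h
        · exact absurd (hts.eq_of_length (le_antisymm hts.length_le h)) htx
      have hab : a < b := by
        rcases Nat.lt_trichotomy a b with h | h | h
        · exact h
        · exfalso; subst h; exact htx (hFa.symm.trans hFb)
        · exfalso
          have := (List.pairwise_iff_getElem.1 hpairF) b a hb ha h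
          rw [hFa, hFb] at this
          omega
      rw [List.any_eq_true]
      refine ⟨((a : Int), (b : Int)), ?_, ?_⟩
      · rw [hP, List.mem_flatMap]
        refine ⟨(a : Int), ?_, ?_⟩
        · rw [PySem.List.mem_pyRange_one]
          constructor
          · exact_mod_cast Nat.zero_le a
          · exact_mod_cast lt_trans hab hb
        · rw [List.mem_map]
          refine ⟨(b : Int), ?_, rfl⟩
          rw [PySem.List.mem_pyRange_one]
          constructor
          · exact_mod_cast hab
          · exact_mod_cast hb
      · simp only
        rw [PySem.List.pyGet?_natCast, PySem.List.pyGet?_natCast,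
          List.getElem?_eq_getElem ha, List.getElem?_eq_getElem hb]
        simp only [Option.getD_some, Bool.and_eq_true, beq_iff_eq]
        refine ⟨?_, hFb⟩
        exact beq_iff_eq.1 ((cond_iff F[a] F[b] (hsortF _ (List.getElem_mem ha))
          (hsortF _ (List.getElem_mem hb))).2 (by rw [hFa, hFb]; exact hts))
  -- replace the survival predicate by qKeep, then move the count back to candList
  have hcongr : F.countP (fun x =>
      !(P.any fun p => (((PySem.List.pyGet? F p.1).getD []).length ==
          (PySem.Set.inter (PySem.Set.ofList ((PySem.List.pyGet? F p.1).getD []))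
            (PySem.Set.ofList ((PySem.List.pyGet? F p.2).getD []))).length)
          && ((PySem.List.pyGet? F p.2).getD [] == x)))
      = F.countP (qKeep u) := by
    apply List.countP_congr
    intro x hx
    have h2 : (x.sublists.any (fun t => u t && !(t == x) && !(t == []))) = true
        ↔ (∃ t, t.Sublist x ∧ t ≠ x ∧ t ≠ [] ∧ u t = true) := by
      simp only [List.any_eq_true, List.mem_sublists, Bool.and_eq_true,
        Bool.not_eq_eq_eq_not, Bool.not_true, beq_eq_false_iff_ne, ne_eq]
      constructor
      · rintro ⟨t, hts, ⟨hu, htx⟩, htn⟩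
        exact ⟨t, hts, htx, htn, hu⟩
      · rintro ⟨t, hts, htx, htn, hu⟩
        exact ⟨t, hts, ⟨hu, htx⟩, htn⟩
    have h3 := Bool.eq_iff_iff.2 ((hmain x hx).trans h2.symm)
    simp only [qKeep, h3]
  rw [hcongr, hF, List.countP_filter]
  congr 1
  apply List.countP_congr
  intro cols _
  rw [Bool.and_comm]

theorem core (u : List Int → Bool) (n : Nat) :
    (let candidates := (PySem.List.pyRange 1 ((n : Int) + 1)).foldl
        (fun acc i => acc ++ pyCombs (PySem.List.pyRange 0 (n : Int)) i.toNat) [];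
     let final := candidates.foldl (fun acc ks => if u ks then acc ++ [ks] else acc) [];
     let answer := PySem.Set.ofList final;
     let answer := (PySem.List.pyRange 0 (final.length : Int)).foldl (fun ans i =>
        (PySem.List.pyRange (i + 1) (final.length : Int)).foldl (fun ans j =>
          if ((PySem.List.pyGet? final i).getD []).length ==
              (PySem.Set.inter (PySem.Set.ofList ((PySem.List.pyGet? final i).getD []))
                (PySem.Set.ofList ((PySem.List.pyGet? final j).getD []))).length
          then PySem.Set.discard ans ((PySem.List.pyGet? final j).getD []) else ans) ans) answer;
     ((answer.length : Int)))
    = (PySem.List.pyRange 1 ((n : Int) + 1)).foldl (fun count size =>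
        (pyCombs (PySem.List.pyRange 0 (n : Int)) size.toNat).foldl (fun count cols =>
          if u cols && !((PySem.List.pyRange 1 size).any (fun k =>
                (pyCombs cols k.toNat).any u))
          then count + 1 else count) count) 0 := by
  rw [aside_eq, bside_eq]

-- ===== VERDICT (by name: the statement is the Claim_ definition above) =====
theorem solution_spec : Claim_equal_solution := by
  intro relation _ _
  exact core (fun ks => (PySem.Set.ofList (relation.map (fun item =>
    ks.map (fun k => (PySem.List.pyGet? item k).getD "")))).length == relation.length)
    ((PySem.List.pyGet? relation 0).getD []).length
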